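-- pv_equiv track=rewrite | github.com/opatiny/predictiveMaintenance | src/utils/getFullSegmentIndices.py | getFullSegmentIndices
-- ===== SOURCE A (Python) =====
-- def getFullSegmentIndices(segmentIndices: list) -> list:
--     """
--     Redefine segment indices to consider all points.
--     Parameters
--     ----------
--     segmentIndices : list
--         List of tuples with start and end indices of constant segments. This ignores transition phases.
--
--     Returns
--     -------
--     list
--         List of tuples with start and end indices of correction segments, which include all points of the signal.
--     """
--     correctionIndices = []
--     firstSegment = [0, segmentIndices[0][1]]
--     correctionIndices.append(firstSegment)
--     for i in range(1, len(segmentIndices)):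
--         start = segmentIndices[i - 1][1] + 1
--         end = segmentIndices[i][1]
--         correctionIndices.append([start, end])
--     return correctionIndices
-- ===== SOURCE B (Python) =====
-- def getFullSegmentIndices(segmentIndices: list) -> list:
--     """Recursive decomposition: peel off the head segment, recurse on the tail
--     carrying the previous segment's end index."""
--     first = segmentIndices[0]
--
--     def go(prevEnd, rest):
--         if not rest:
--             return []
--         return [[prevEnd + 1, rest[0][1]]] + go(rest[0][1], rest[1:])
--
--     return [[0, first[1]]] + go(first[1], segmentIndices[1:])
-- ===== Notes on version B (the rewrite author's own statement) =====
-- stated objective: alternative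
-- what changed: B replaces A's indexed foldl over range(1,len) (re-fetching both segmentIndices[i-1] and segmentIndices[i] each iteration) with a structural recursion on the tail of the list that carries the previous segment's end as an accumulator.
import Mathlib
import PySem

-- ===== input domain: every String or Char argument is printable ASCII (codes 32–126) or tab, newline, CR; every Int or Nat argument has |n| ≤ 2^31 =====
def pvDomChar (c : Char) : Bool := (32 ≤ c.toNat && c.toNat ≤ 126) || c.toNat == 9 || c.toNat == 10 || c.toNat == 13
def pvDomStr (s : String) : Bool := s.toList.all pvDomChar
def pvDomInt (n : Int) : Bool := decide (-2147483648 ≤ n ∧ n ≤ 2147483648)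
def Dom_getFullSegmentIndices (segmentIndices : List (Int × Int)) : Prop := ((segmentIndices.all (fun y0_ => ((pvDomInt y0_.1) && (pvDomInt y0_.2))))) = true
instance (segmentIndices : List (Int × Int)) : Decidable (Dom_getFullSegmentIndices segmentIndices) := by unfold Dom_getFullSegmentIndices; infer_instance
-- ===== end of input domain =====

-- B is a structural recursion on the tail carrying the previous segment's end, instead of A's indexed loop; objective: alternative decomposition.

-- ===== PORT A =====
-- A's explicit loop over i = 1 .. len-1 with indexed access; segmentIndices[0] raises IndexError on [] (excluded by Pre_).
def getFullSegmentIndices (segmentIndices : List (Int × Int)) : List (List Int) :=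
  match PySem.List.pyGet? segmentIndices 0 with
  | none => []   -- IndexError in Python; outside Pre_
  | some p0 =>
    let correctionIndices : List (List Int) := [[0, p0.2]]
    (PySem.List.pyRange 1 (segmentIndices.length : Int) 1).foldl
      (fun acc i =>
        let start := (PySem.List.pyGetD segmentIndices (i - 1) (0, 0)).2 + 1
        let «end» := (PySem.List.pyGetD segmentIndices i (0, 0)).2
        acc ++ [[start, «end»]])
      correctionIndices

-- ===== PORT B =====
-- helper go(prevEnd, rest) from Source B: recursion on the tail, carrying the previous end.
def altGo (prevEnd : Int) : List (Int × Int) → List (List Int)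
  | [] => []
  | p :: rest => [prevEnd + 1, p.2] :: altGo p.2 rest

def getFullSegmentIndices_alt (segmentIndices : List (Int × Int)) : List (List Int) :=
  match PySem.List.pyGet? segmentIndices 0 with
  | none => []   -- IndexError in Python; outside Pre_
  | some first => [0, first.2] :: altGo first.2 (PySem.List.slice segmentIndices (some 1) none)

-- ===== PRECONDITION & SPEC =====
-- Both A and B index segmentIndices[0], raising IndexError on the empty list; Pre_ excludes only that.
def Pre_getFullSegmentIndices (segmentIndices : List (Int × Int)) : Prop := segmentIndices ≠ []
instance (segmentIndices : List (Int × Int)) : Decidable (Pre_getFullSegmentIndices segmentIndices) := by unfold Pre_getFullSegmentIndices; infer_instance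
def pvWitness_getFullSegmentIndices : (List (Int × Int)) := [(0, 3), (5, 8)]

def Spec_getFullSegmentIndices (segmentIndices : List (Int × Int)) (out : List (List Int)) : Prop := out = getFullSegmentIndices_alt segmentIndices
instance (segmentIndices : List (Int × Int)) (out : List (List Int)) : Decidable (Spec_getFullSegmentIndices segmentIndices out) := by unfold Spec_getFullSegmentIndices; infer_instance

-- ===== CLAIM (what is proved, stated in full; the proofs are below) =====
def Claim_equal_getFullSegmentIndices : Prop := ∀ (segmentIndices : List (Int × Int)), Dom_getFullSegmentIndices segmentIndices → Pre_getFullSegmentIndices segmentIndices → Spec_getFullSegmentIndices segmentIndices (getFullSegmentIndices segmentIndices)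

-- ===== LEMMAS AND PROOFS =====

theorem flatten_map_singleton {α β : Type} (l : List α) (f : α → β) :
    (l.map (fun x => [f x])).flatten = l.map f := by
  induction l <;> simp_all

-- the indexed map over range equals the structural recursion altGo
theorem range_map_eq_altGo (l : List (Int × Int)) (p : Int × Int) :
    (List.range l.length).map
      (fun k => [((p :: l).getD k (0, 0)).2 + 1, ((p :: l).getD (k + 1) (0, 0)).2]) =
    altGo p.2 l := by
  induction l generalizing p with
  | nil => simp [altGo]
  | cons q t ih =>
    rw [List.length_cons, List.range_succ_eq_map, List.map_cons, List.map_map]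
    simp only [List.getD_cons_zero, List.getD_cons_succ, altGo]
    exact congrArg _ (ih q)

theorem getFullSegmentIndices_eq_alt_cons (p : Int × Int) (rest : List (Int × Int)) :
    getFullSegmentIndices (p :: rest) = getFullSegmentIndices_alt (p :: rest) := by
  simp only [getFullSegmentIndices, getFullSegmentIndices_alt, PySem.List.pyGet?,
    PySem.List.pyIdx?]
  norm_num
  rw [PySem.List.slice_from, flatten_map_singleton, PySem.List.pyRange_one]
  have hlen : ((rest.length : Int) + 1 - 1).toNat = rest.length := by omega
  rw [hlen, List.map_map]
  have h2 : ∀ k ∈ List.range rest.length,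
      ((fun i => [(PySem.List.pyGetD (p :: rest) (i - 1) (0, 0)).2 + 1,
                  (PySem.List.pyGetD (p :: rest) i (0, 0)).2]) ∘ fun k : Nat => 1 + (k : Int)) k =
      (fun k => [((p :: rest).getD k (0, 0)).2 + 1, ((p :: rest).getD (k + 1) (0, 0)).2]) k := by
    intro k _
    simp only [Function.comp]
    have e1 : (1 : Int) + (k : Int) - 1 = (k : Int) := by ring
    have e3 : (1 : Int) + (k : Int) = ((k + 1 : Nat) : Int) := by push_cast; ring
    rw [e1, e3, PySem.List.pyGetD_natCast, PySem.List.pyGetD_natCast]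
  rw [List.map_congr_left h2, range_map_eq_altGo]
  simp
  norm_num

-- ===== VERDICT (by name: the statement is the Claim_ definition above) =====
theorem getFullSegmentIndices_spec : Claim_equal_getFullSegmentIndices := by
  intro xs _ hpre
  unfold Spec_getFullSegmentIndices
  obtain ⟨p, rest, rfl⟩ := List.exists_cons_of_ne_nil hpre
  exact getFullSegmentIndices_eq_alt_cons p rest
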